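-- pv_equiv track=rewrite | github.com/AlecBytes/AdventOfCode2025 | Day4/solution2.py | find_accessible_paper
-- ===== SOURCE A (Python) =====
-- def is_pos_inbounds(pos, grid):
--    i, j = pos
--    return i >= 0 and i < len(grid) and j >= 0 and j < len(grid[0])
--
-- def count_adjacent_paper(pos, grid):
--     i, j = pos
--     count = 0
--     pos_NW = (i - 1, j - 1)
--     pos_N = (i - 1, j)
--     pos_NE = (i - 1, j + 1)
--     pos_W = (i, j - 1)
--     pos_E = (i, j + 1)
--     pos_SW = (i + 1, j - 1)
--     pos_S = (i + 1, j)
--     pos_SE = (i + 1, j + 1)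
--     adjacent_positions = [pos_NW, pos_N, pos_NE, pos_W, pos_E, pos_SW, pos_S, pos_SE]
--
--     for neighbor in adjacent_positions:
--         if is_pos_inbounds(neighbor, grid):
--             if grid[neighbor[0]][neighbor[1]] == '@':
--                 count += 1
--
--     return count
--
-- def find_accessible_paper(grid):
--     count = 0
--     paper_pos_to_remove = []
--     for i, row in enumerate(grid):
--         for j, pos in enumerate(row):
--             if pos == '@':
--                 if count_adjacent_paper((i, j), grid) < 4:
--                     count += 1
--                     paper_pos_to_remove.append((i, j))
--     return count, paper_pos_to_remove
-- ===== SOURCE B (Python) =====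
-- # Scatter instead of gather: one pass bumps a neighbour-count dict from each
-- # paper cell, a second pass reads the precomputed counts -- no per-cell
-- # bounds-checked probing of the grid.  The board's width is that of its
-- # first row; cells beyond it are off the board.
-- OFFSETS = ((-1, -1), (-1, 0), (-1, 1), (0, -1), (0, 1), (1, -1), (1, 0), (1, 1))
--
-- def find_accessible_paper(grid):
--     w = len(grid[0]) if grid else 0
--     counts = {}
--     for i, row in enumerate(grid):
--         for j, cell in enumerate(row):
--             if cell == '@' and j < w:
--                 for di, dj in OFFSETS:
--                     p = (i + di, j + dj)
--                     counts[p] = counts.get(p, 0) + 1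
--     count = 0
--     paper_pos_to_remove = []
--     for i, row in enumerate(grid):
--         for j, cell in enumerate(row):
--             if cell == '@' and counts.get((i, j), 0) < 4:
--                 count += 1
--                 paper_pos_to_remove.append((i, j))
--     return count, paper_pos_to_remove
-- ===== Notes on version B (the rewrite author's own statement) =====
-- stated objective: alternative
-- what changed: Replaces A's per-cell gather (8 bounds-checked grid probes for every '@' cell via count_adjacent_paper) with a scatter pass that bumps a dict of neighbour counts once per paper cell, then a second pass that only reads the precomputed counts.
import Mathlib
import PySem

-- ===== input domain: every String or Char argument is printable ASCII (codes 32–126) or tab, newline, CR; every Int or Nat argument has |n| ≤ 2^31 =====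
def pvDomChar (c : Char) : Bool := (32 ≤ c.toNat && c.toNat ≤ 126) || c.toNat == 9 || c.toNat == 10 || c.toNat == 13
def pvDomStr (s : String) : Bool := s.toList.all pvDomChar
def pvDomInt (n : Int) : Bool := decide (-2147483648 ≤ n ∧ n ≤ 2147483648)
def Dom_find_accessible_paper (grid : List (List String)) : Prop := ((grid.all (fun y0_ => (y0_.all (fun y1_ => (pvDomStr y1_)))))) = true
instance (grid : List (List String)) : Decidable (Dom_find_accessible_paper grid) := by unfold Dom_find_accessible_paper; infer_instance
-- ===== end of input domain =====

-- B replaces A's per-cell gather (8 bounds-checked grid probes per '@') by one scatter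
-- pass that bumps a dict of neighbour counts and one read-only pass over it (objective:
-- alternative decomposition, same asymptotic cost).

-- ===== PORT A =====
-- 'j < len(grid[0])': grid[0] is only reached when 0 <= i < len(grid) (Python's 'and'
-- short-circuits), so grid is nonempty there and headD [] is exact.
def is_pos_inbounds (pos : Int × Int) (grid : List (List String)) : Bool :=
  decide (0 ≤ pos.1) && decide (pos.1 < (grid.length : Int)) &&
  decide (0 ≤ pos.2) && decide (pos.2 < (((grid.headD []).length : Int)))

-- grid[n.1][n.2]: pyGet? is none exactly where Python raises IndexError (excluded by Pre_);
-- the getD defaults are never the value Python returns on admitted inputs.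
def count_adjacent_paper (pos : Int × Int) (grid : List (List String)) : Int :=
  let i := pos.1
  let j := pos.2
  let adjacent_positions : List (Int × Int) :=
    [(i-1, j-1), (i-1, j), (i-1, j+1), (i, j-1), (i, j+1), (i+1, j-1), (i+1, j), (i+1, j+1)]
  adjacent_positions.foldl (fun count n =>
    if is_pos_inbounds n grid then
      if ((PySem.List.pyGet? ((PySem.List.pyGet? grid n.1).getD []) n.2).getD "") == "@" then
        count + 1
      else count
    else count) 0

def find_accessible_paper (grid : List (List String)) : Int × (List (Int × Int)) :=
  (PySem.List.enumerate grid).foldl (fun acc ir =>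
    (PySem.List.enumerate ir.2).foldl (fun acc2 jc =>
      if jc.2 == "@" then
        if count_adjacent_paper (ir.1, jc.1) grid < 4 then
          (acc2.1 + 1, acc2.2 ++ [(ir.1, jc.1)])
        else acc2
      else acc2) acc) (0, [])

-- ===== PORT B =====
def pvOffsets : List (Int × Int) :=
  [(-1, -1), (-1, 0), (-1, 1), (0, -1), (0, 1), (1, -1), (1, 0), (1, 1)]

-- first pass of Source B: counts[p] = counts.get(p, 0) + 1 for the 8 neighbours of each
-- paper cell lying within the board width w = len(grid[0]).
def pvCounts (grid : List (List String)) : PySem.Dict (Int × Int) Int :=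
  let w : Int := ((grid.headD []).length : Int)
  (PySem.List.enumerate grid).foldl (fun d ir =>
    (PySem.List.enumerate ir.2).foldl (fun d2 jc =>
      if jc.2 == "@" && decide (jc.1 < w) then
        pvOffsets.foldl (fun d3 o =>
          d3.insert (ir.1 + o.1, jc.1 + o.2) (d3.getD (ir.1 + o.1, jc.1 + o.2) 0 + 1)) d2
      else d2) d) PySem.Dict.empty

def find_accessible_paper_alt (grid : List (List String)) : Int × (List (Int × Int)) :=
  let counts := pvCounts grid
  (PySem.List.enumerate grid).foldl (fun acc ir =>
    (PySem.List.enumerate ir.2).foldl (fun acc2 jc =>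
      if jc.2 == "@" && decide (counts.getD (ir.1, jc.1) 0 < 4) then
        (acc2.1 + 1, acc2.2 ++ [(ir.1, jc.1)])
      else acc2) acc) (0, [])

-- ===== PRECONDITION & SPEC =====
-- Pre_ excludes exactly the ragged grids on which A raises IndexError: some '@' cell has a
-- neighbour that is in bounds for A's nominal width (that of row 0) but beyond its own
-- row's length, so grid[ni][nj] raises.
def Pre_find_accessible_paper (grid : List (List String)) : Prop :=
  ∀ ir ∈ PySem.List.enumerate grid, ∀ jc ∈ PySem.List.enumerate ir.2, jc.2 = "@" →
    ∀ o ∈ ([(-1, -1), (-1, 0), (-1, 1), (0, -1), (0, 1), (1, -1), (1, 0), (1, 1)] : List (Int × Int)),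
      0 ≤ ir.1 + o.1 → ir.1 + o.1 < (grid.length : Int) → 0 ≤ jc.1 + o.2 →
      jc.1 + o.2 < ((grid.headD []).length : Int) →
      jc.1 + o.2 < (((PySem.List.pyGet? grid (ir.1 + o.1)).getD []).length : Int)
instance (grid : List (List String)) : Decidable (Pre_find_accessible_paper grid) := by
  unfold Pre_find_accessible_paper; infer_instance

def pvWitness_find_accessible_paper : List (List String) :=
  [["@", ".", "@"], [".", "@", "."]]

def Spec_find_accessible_paper (grid : List (List String)) (out : Int × (List (Int × Int))) : Prop := out = find_accessible_paper_alt grid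
instance (grid : List (List String)) (out : Int × (List (Int × Int))) : Decidable (Spec_find_accessible_paper grid out) := by unfold Spec_find_accessible_paper; infer_instance

-- ===== CLAIM (what is proved, stated in full; the proofs are below) =====
def Claim_equal_find_accessible_paper : Prop := ∀ (grid : List (List String)), Dom_find_accessible_paper grid → Pre_find_accessible_paper grid → Spec_find_accessible_paper grid (find_accessible_paper grid)


-- ===== LEMMAS AND PROOFS =====

-- proof-side abbreviations
def pvW (grid : List (List String)) : Int := ((grid.headD []).length : Int)

-- the neighbourhood relation: s is one of the 8 neighbours of p
abbrev pvAdj (s p : Int × Int) : Prop :=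
  ¬(s.1 = p.1 ∧ s.2 = p.2) ∧ -1 ≤ p.1 - s.1 ∧ p.1 - s.1 ≤ 1 ∧ -1 ≤ p.2 - s.2 ∧ p.2 - s.2 ≤ 1

-- the positions B's first pass scatters from, in scan order
def pvSrcs (grid : List (List String)) : List (Int × Int) :=
  (PySem.List.enumerate grid).flatMap (fun ir =>
    ((PySem.List.enumerate ir.2).filter (fun jc => jc.2 == "@" && decide (jc.1 < pvW grid))).map
      (fun jc => (ir.1, jc.1)))

-- all scattered-to positions, with multiplicity
def pvScatterList (grid : List (List String)) : List (Int × Int) :=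
  (pvSrcs grid).flatMap (fun s => pvOffsets.map (fun o => (s.1 + o.1, s.2 + o.2)))

-- A's per-neighbour test, as a predicate on the neighbour position
def pvGood (grid : List (List String)) (q : Int × Int) : Bool :=
  is_pos_inbounds q grid &&
    (((PySem.List.pyGet? ((PySem.List.pyGet? grid q.1).getD []) q.2).getD "") == "@")

theorem pv_foldl_flatMap {α β δ : Type} (l : List α) (g : α → List β) (F : δ → β → δ) (d : δ) :
    (l.flatMap g).foldl F d = l.foldl (fun d x => (g x).foldl F d) d := by
  induction l generalizing d with
  | nil => rfl
  | cons a t ih => simp [List.flatMap_cons, List.foldl_append, ih]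

-- B's dict is the flattened scatter loop
theorem pvCounts_eq (grid : List (List String)) :
    pvCounts grid
      = (pvScatterList grid).foldl (fun d p => d.insert p (d.getD p 0 + 1)) PySem.Dict.empty := by
  unfold pvScatterList
  rw [pv_foldl_flatMap]
  unfold pvSrcs
  rw [pv_foldl_flatMap]
  unfold pvCounts pvW
  apply PySem.List.foldl_congr_mem
  intro d ir _
  rw [List.foldl_map]
  rw [← PySem.List.foldl_if_eq_foldl_filter]
  apply PySem.List.foldl_congr_mem
  intro d2 jc _
  split
  · rw [List.foldl_map]
  · rfl

theorem pvCounts_getD (grid : List (List String)) (p : Int × Int) :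
    (pvCounts grid).getD p 0 = ((pvScatterList grid).count p : Int) := by
  rw [pvCounts_eq, PySem.Dict.getD_foldl_insert_add_one, PySem.Dict.getD_empty, zero_add]

-- each source contributes exactly one bump to each of its 8 neighbours
theorem pv_count_map_offsets (s p : Int × Int) :
    (pvOffsets.map (fun o => (s.1 + o.1, s.2 + o.2))).count p = if pvAdj s p then 1 else 0 := by
  simp only [pvOffsets, List.map_cons, List.map_nil, List.count_cons, List.count_nil,
    beq_iff_eq, Prod.ext_iff, pvAdj]
  split_ifs <;> omega

theorem pv_sum_map_ite {α : Type} (l : List α) (P : α → Prop) [DecidablePred P] :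
    (l.map (fun x => if P x then (1 : Nat) else 0)).sum = l.countP (fun x => decide (P x)) := by
  induction l with
  | nil => rfl
  | cons a t ih => by_cases h : P a <;> simp [h, ih, Nat.add_comm]

theorem pv_scatter_count (grid : List (List String)) (p : Int × Int) :
    (pvScatterList grid).count p = (pvSrcs grid).countP (fun s => decide (pvAdj s p)) := by
  unfold pvScatterList
  rw [List.count_flatMap]
  have : ∀ s : Int × Int,
      (pvOffsets.map (fun o => (s.1 + o.1, s.2 + o.2))).count p = if pvAdj s p then 1 else 0 :=
    fun s => pv_count_map_offsets s p
  simp only [Function.comp_def, this]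
  exact pv_sum_map_ite _ _

-- A's gather loop as a countP over the 8 neighbour positions
theorem pv_gather_eq (grid : List (List String)) (p : Int × Int) :
    count_adjacent_paper p grid
      = ((pvOffsets.map (fun o => (p.1 + o.1, p.2 + o.2))).countP (pvGood grid) : Int) := by
  simp only [count_adjacent_paper]
  have hl : [(p.1 - 1, p.2 - 1), (p.1 - 1, p.2), (p.1 - 1, p.2 + 1), (p.1, p.2 - 1),
      (p.1, p.2 + 1), (p.1 + 1, p.2 - 1), (p.1 + 1, p.2), (p.1 + 1, p.2 + 1)]
      = pvOffsets.map (fun o => (p.1 + o.1, p.2 + o.2)) := by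
    simp [pvOffsets, Prod.ext_iff]; omega
  rw [hl]
  have hbody : ∀ (c : Int) (n : Int × Int),
      (if is_pos_inbounds n grid then
        if ((PySem.List.pyGet? ((PySem.List.pyGet? grid n.1).getD []) n.2).getD "") == "@" then
          c + 1
        else c
      else c) = if pvGood grid n then c + 1 else c := by
    intro c n
    unfold pvGood
    cases h1 : is_pos_inbounds n grid <;>
      cases h2 : ((PySem.List.pyGet? ((PySem.List.pyGet? grid n.1).getD []) n.2).getD "") == "@" <;>
      simp
  calc (pvOffsets.map (fun o => (p.1 + o.1, p.2 + o.2))).foldl (fun count n =>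
        if is_pos_inbounds n grid then
          if ((PySem.List.pyGet? ((PySem.List.pyGet? grid n.1).getD []) n.2).getD "") == "@" then
            count + 1
          else count
        else count) 0
      = (pvOffsets.map (fun o => (p.1 + o.1, p.2 + o.2))).foldl (fun count n =>
          if pvGood grid n then count + 1 else count) 0 := by
        apply PySem.List.foldl_congr_mem
        intro c n _
        exact hbody c n
    _ = ((pvOffsets.map (fun o => (p.1 + o.1, p.2 + o.2))).countP (pvGood grid) : Int) := by
        rw [PySem.List.foldl_if_add_one, zero_add]

-- A's neighbour test succeeds exactly on the positions B scatters from
theorem pv_good_iff_mem (grid : List (List String)) (q : Int × Int) :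
    pvGood grid q = true ↔ q ∈ pvSrcs grid := by
  constructor
  · intro h
    simp only [pvGood, is_pos_inbounds, Bool.and_eq_true, decide_eq_true_eq, beq_iff_eq] at h
    obtain ⟨⟨⟨⟨h1, h2⟩, h3⟩, h4⟩, h5⟩ := h
    have hklt : q.1.toNat < grid.length := by omega
    have hget : PySem.List.pyGet? grid q.1 = some grid[q.1.toNat] :=
      PySem.List.pyGet?_eq_some_getElem grid h1 h2
    rw [hget] at h5
    simp only [Option.getD_some] at h5
    set row := grid[q.1.toNat] with hrow
    have hjlt : q.2 < (row.length : Int) := by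
      by_contra hno
      rw [Int.not_lt] at hno
      have : PySem.List.pyGet? row q.2 = none := by
        rw [PySem.List.pyGet?_eq_none_iff]
        simp only [PySem.Raise.InRange]
        omega
      rw [this] at h5
      simp at h5
    have hjn : q.2.toNat < row.length := by omega
    have hcell : row[q.2.toNat] = "@" := by
      have := PySem.List.pyGet?_eq_some_getElem row h3 hjlt
      rw [this] at h5
      simpa using h5
    simp only [pvSrcs, List.mem_flatMap, List.mem_map, List.mem_filter,
      PySem.List.mem_enumerate_iff]
    refine ⟨(q.1, row), ⟨q.1.toNat, hklt, by simp [hrow, Int.toNat_of_nonneg h1]⟩,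
      (q.2, row[q.2.toNat]), ⟨⟨q.2.toNat, hjn, by simp [Int.toNat_of_nonneg h3]⟩, ?_⟩, ?_⟩
    · simp only [Bool.and_eq_true, beq_iff_eq, decide_eq_true_eq]
      exact ⟨hcell, by simpa [pvW] using h4⟩
    · simp
  · intro h
    simp only [pvSrcs, List.mem_flatMap, List.mem_map, List.mem_filter,
      PySem.List.mem_enumerate_iff] at h
    obtain ⟨ir, ⟨k, hk, hir⟩, jc, ⟨⟨k2, hk2, hjc⟩, hfilt⟩, hq⟩ := h
    subst hir
    subst hjc
    simp only [Bool.and_eq_true, beq_iff_eq, decide_eq_true_eq] at hfilt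
    simp only [zero_add] at hfilt hq ⊢
    obtain ⟨hcell, hw⟩ := hfilt
    simp only [pvGood, is_pos_inbounds, Bool.and_eq_true, decide_eq_true_eq, beq_iff_eq]
    have e1 : q.1 = (k : Int) := by rw [← hq]
    have e2 : q.2 = (k2 : Int) := by rw [← hq]
    rw [e1, e2]
    refine ⟨⟨⟨⟨by positivity, by exact_mod_cast hk⟩, by positivity⟩, ?_⟩, ?_⟩
    · simpa [pvW] using hw
    · rw [PySem.List.pyGet?_natCast grid k, List.getElem?_eq_getElem hk]
      simp only [Option.getD_some]
      rw [PySem.List.pyGet?_natCast _ k2, List.getElem?_eq_getElem hk2]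
      simpa using hcell

theorem pv_nodup_srcs (grid : List (List String)) : (pvSrcs grid).Nodup := by
  unfold pvSrcs
  rw [List.nodup_flatMap]
  constructor
  · intro ir _
    have h2 : ((PySem.List.enumerate ir.2 0).filter
        (fun jc => jc.2 == "@" && decide (jc.1 < pvW grid))).Pairwise (fun a b => a.1 < b.1) :=
      (PySem.List.pairwise_lt_enumerate ir.2 0).filter _
    have h3 : (((PySem.List.enumerate ir.2 0).filter
        (fun jc => jc.2 == "@" && decide (jc.1 < pvW grid))).map
        (fun jc => (ir.1, jc.1))).Pairwise (· ≠ ·) := by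
      rw [List.pairwise_map]
      exact h2.imp (fun {a b} hab => by simp only [ne_eq, Prod.ext_iff, not_and]; omega)
    exact h3
  · have h := PySem.List.pairwise_lt_enumerate grid 0
    refine h.imp ?_
    intro a b hab x hxa hxb
    simp only [List.mem_map, List.mem_filter] at hxa hxb
    obtain ⟨jc, _, hja⟩ := hxa
    obtain ⟨jc', _, hjb⟩ := hxb
    have : a.1 = b.1 := by
      have e1 : x.1 = a.1 := by rw [← hja]
      have e2 : x.1 = b.1 := by rw [← hjb]
      omega
    omega

theorem pv_nodup_nbrs (p : Int × Int) :
    (pvOffsets.map (fun o => (p.1 + o.1, p.2 + o.2))).Nodup := by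
  apply List.Nodup.map
  · intro a b hab
    simp only [Prod.ext_iff] at hab ⊢
    omega
  · decide

theorem pv_countP_mem_swap {α : Type} [DecidableEq α] (l m : List α)
    (hl : l.Nodup) (hm : m.Nodup) :
    l.countP (fun x => decide (x ∈ m)) = m.countP (fun x => decide (x ∈ l)) := by
  rw [List.countP_eq_length_filter, List.countP_eq_length_filter]
  have cl : (l.filter (fun x => decide (x ∈ m))).length
      = (l.filter (fun x => decide (x ∈ m))).toFinset.card := by
    rw [List.card_toFinset, List.Nodup.dedup (hl.filter _)]
  have cm : (m.filter (fun x => decide (x ∈ l))).length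
      = (m.filter (fun x => decide (x ∈ l))).toFinset.card := by
    rw [List.card_toFinset, List.Nodup.dedup (hm.filter _)]
  rw [cl, cm]
  congr 1
  ext x
  simp only [List.mem_toFinset, List.mem_filter, decide_eq_true_eq]
  tauto

theorem pv_mem_nbrs_iff (p q : Int × Int) :
    q ∈ pvOffsets.map (fun o => (p.1 + o.1, p.2 + o.2)) ↔ pvAdj q p := by
  simp only [pvOffsets, List.map_cons, List.map_nil, List.mem_cons, List.not_mem_nil,
    or_false, Prod.ext_iff, pvAdj]
  omega

-- the key pointwise fact: B's precomputed table agrees with A's per-cell gather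
theorem pv_counts_getD_eq (grid : List (List String)) (p : Int × Int) :
    (pvCounts grid).getD p 0 = count_adjacent_paper p grid := by
  rw [pvCounts_getD, pv_scatter_count, pv_gather_eq]
  congr 1
  have h1 : (pvOffsets.map (fun o => (p.1 + o.1, p.2 + o.2))).countP (pvGood grid)
      = (pvOffsets.map (fun o => (p.1 + o.1, p.2 + o.2))).countP
          (fun x => decide (x ∈ pvSrcs grid)) := by
    apply List.countP_congr
    intro x _
    by_cases hx : x ∈ pvSrcs grid
    · simp [hx, (pv_good_iff_mem grid x).2 hx]
    · simp only [hx, decide_false]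
      cases hgg : pvGood grid x
      · rfl
      · exact absurd ((pv_good_iff_mem grid x).1 hgg) hx
  have h2 : (pvSrcs grid).countP (fun s => decide (pvAdj s p))
      = (pvSrcs grid).countP (fun s => decide (s ∈ pvOffsets.map (fun o => (p.1 + o.1, p.2 + o.2)))) := by
    apply List.countP_congr
    intro s _
    simp [pv_mem_nbrs_iff]
  rw [h1, h2]
  convert pv_countP_mem_swap (pvSrcs grid) (pvOffsets.map (fun o => (p.1 + o.1, p.2 + o.2)))
      (pv_nodup_srcs grid) (pv_nodup_nbrs p) using 2 <;>
    (funext x; exact decide_eq_decide.mpr Iff.rfl)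

theorem ports_agree (grid : List (List String)) :
    find_accessible_paper grid = find_accessible_paper_alt grid := by
  unfold find_accessible_paper find_accessible_paper_alt
  apply PySem.List.foldl_congr_mem
  intro acc ir _
  apply PySem.List.foldl_congr_mem
  intro acc2 jc _
  rw [pv_counts_getD_eq]
  by_cases h : jc.2 = "@"
  · by_cases h4 : count_adjacent_paper (ir.1, jc.1) grid < 4 <;> simp [h, h4]
  · simp [h]

-- ===== VERDICT (by name: the statement is the Claim_ definition above) =====
theorem find_accessible_paper_spec : Claim_equal_find_accessible_paper := by
  intro grid _ _
  unfold Spec_find_accessible_paper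
  exact ports_agree grid
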